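-- pv_equiv track=rewrite | github.com/silengbiom/ATP2024 | TPC7/TPC7.py | maxPeriodoCalor
-- ===== SOURCE A (Python) =====
-- def maxPeriodoCalor(tabMeteo, p):
--     max_consecutivos = 0
--     atuais_consecutivos = 0
--
--     for registo in tabMeteo:
--         data, temp_min, temp_max, precip = registo
--         if precip < p:
--             atuais_consecutivos += 1
--             max_consecutivos = max(max_consecutivos, atuais_consecutivos)
--         else:
--             atuais_consecutivos = 0
--
--     return max_consecutivos
-- ===== SOURCE B (Python) =====
-- def maxPeriodoCalor(tabMeteo, p):
--     flags = []
--     for registo in tabMeteo: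
--         data, temp_min, temp_max, precip = registo
--         flags.append(precip < p)
--     best = 0
--     i = 0
--     n = len(flags)
--     while i < n:
--         j = i
--         while j < n and flags[j] == flags[i]:
--             j += 1
--         if flags[i]:
--             best = max(best, j - i)
--         i = j
--     return best
-- ===== Notes on version B (the rewrite author's own statement) =====
-- stated objective: alternative
-- what changed: Replaces the running-counter accumulator with a two-phase group-then-reduce pass: first compute the boolean flags precip < p, then scan maximal runs of equal flags with a two-pointer loop and take the max length of the True runs.
import Mathlib
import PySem

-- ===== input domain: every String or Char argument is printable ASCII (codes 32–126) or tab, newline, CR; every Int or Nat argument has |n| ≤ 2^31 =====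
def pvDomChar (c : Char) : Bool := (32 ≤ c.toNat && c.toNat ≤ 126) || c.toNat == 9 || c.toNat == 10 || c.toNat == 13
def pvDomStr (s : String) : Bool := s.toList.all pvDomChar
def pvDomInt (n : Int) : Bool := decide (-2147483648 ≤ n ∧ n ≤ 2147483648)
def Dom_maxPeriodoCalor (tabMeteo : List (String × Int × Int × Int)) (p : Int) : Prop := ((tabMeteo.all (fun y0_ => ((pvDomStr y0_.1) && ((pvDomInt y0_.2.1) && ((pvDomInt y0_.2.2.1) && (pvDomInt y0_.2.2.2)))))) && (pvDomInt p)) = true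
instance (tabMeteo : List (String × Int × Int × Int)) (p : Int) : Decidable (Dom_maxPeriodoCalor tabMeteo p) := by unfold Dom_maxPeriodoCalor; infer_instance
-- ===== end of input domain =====

-- B replaces A's running-counter accumulator with a two-phase group-then-reduce pass
-- (compute the flags precip < p, then scan maximal runs of equal flags); alternative, not faster.

-- ===== PORT A =====
-- running-counter fold: state = (max_consecutivos, atuais_consecutivos)
def maxPeriodoCalor (tabMeteo : List (String × Int × Int × Int)) (p : Int) : Int :=
  (tabMeteo.foldl (fun s registo =>
      match registo with
      | (_data, _temp_min, _temp_max, precip) =>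
        if precip < p then (max s.1 (s.2 + 1), s.2 + 1) else (s.1, 0))
    ((0 : Int), (0 : Int))).1

-- ===== PORT B =====
-- inner while loop of Source B: length of the maximal run of flag b at the front, and the rest
def pvTakeRun (b : Bool) : List Bool → Int × List Bool
  | [] => (0, [])
  | x :: l => if x = b then ((pvTakeRun b l).1 + 1, (pvTakeRun b l).2) else (0, x :: l)

theorem pvTakeRun_len (b : Bool) : ∀ l : List Bool, (pvTakeRun b l).2.length ≤ l.length := by
  intro l
  induction l with
  | nil => simp [pvTakeRun]
  | cons x l ih =>
    by_cases h : x = b <;> simp [pvTakeRun, h] <;> omega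

-- outer while loop of Source B: walk run by run, keeping the best True-run length
def pvScan : List Bool → Int → Int
  | [], best => best
  | b :: l, best =>
    let t := pvTakeRun b l
    pvScan t.2 (if b then max best (t.1 + 1) else best)
termination_by l _ => l.length
decreasing_by
  exact Nat.lt_succ_of_le (pvTakeRun_len b l)

def maxPeriodoCalor_alt (tabMeteo : List (String × Int × Int × Int)) (p : Int) : Int :=
  pvScan (tabMeteo.map (fun registo =>
      match registo with
      | (_data, _temp_min, _temp_max, precip) => decide (precip < p))) 0

-- ===== PRECONDITION & SPEC =====
def Spec_maxPeriodoCalor (tabMeteo : List (String × Int × Int × Int)) (p : Int) (out : Int) : Prop := out = maxPeriodoCalor_alt tabMeteo p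
instance (tabMeteo : List (String × Int × Int × Int)) (p : Int) (out : Int) : Decidable (Spec_maxPeriodoCalor tabMeteo p out) := by unfold Spec_maxPeriodoCalor; infer_instance

-- ===== CLAIM (what is proved, stated in full; the proofs are below) =====
def Claim_equal_maxPeriodoCalor : Prop := ∀ (tabMeteo : List (String × Int × Int × Int)) (p : Int), Dom_maxPeriodoCalor tabMeteo p → Spec_maxPeriodoCalor tabMeteo p (maxPeriodoCalor tabMeteo p)

-- ===== LEMMAS AND PROOFS =====

-- A's loop, restated over the boolean flags
def pvAf : List Bool → Int → Int → Int
  | [], m, _ => m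
  | true :: l, m, c => pvAf l (max m (c + 1)) (c + 1)
  | false :: l, m, _ => pvAf l m 0

theorem foldl_eq_pvAf (p : Int) : ∀ (tab : List (String × Int × Int × Int)) (m c : Int),
    (tab.foldl (fun s registo =>
      match registo with
      | (_data, _temp_min, _temp_max, precip) =>
        if precip < p then (max s.1 (s.2 + 1), s.2 + 1) else (s.1, 0)) (m, c)).1
    = pvAf (tab.map (fun registo =>
      match registo with
      | (_data, _temp_min, _temp_max, precip) => decide (precip < p))) m c := by
  intro tab
  induction tab with
  | nil => intro m c; simp [pvAf]
  | cons r rest ih =>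
    intro m c
    obtain ⟨d, a, b, pr⟩ := r
    by_cases h : pr < p <;> simp [List.foldl, h, pvAf, ih]

theorem pvAf_max : ∀ (l : List Bool) (m c : Int), 0 ≤ m → 0 ≤ c → pvAf l m c = max m (pvAf l 0 c) := by
  intro l
  induction l with
  | nil => intro m c hm _; simp [pvAf]; omega
  | cons b l ih =>
    intro m c hm hc
    cases b with
    | true =>
      simp only [pvAf]
      rw [ih (max m (c + 1)) (c + 1) (by omega) (by omega),
          ih (max 0 (c + 1)) (c + 1) (by omega) (by omega)]
      omega
    | false =>
      simp only [pvAf]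
      rw [ih m 0 hm le_rfl]

theorem pvTakeRun_nonneg (b : Bool) : ∀ l : List Bool, 0 ≤ (pvTakeRun b l).1 := by
  intro l
  induction l with
  | nil => simp [pvTakeRun]
  | cons x l ih =>
    by_cases h : x = b <;> simp [pvTakeRun, h] <;> omega

theorem pvAf_skipFalse : ∀ l : List Bool, pvAf l 0 0 = pvAf (pvTakeRun false l).2 0 0 := by
  intro l
  induction l with
  | nil => simp [pvTakeRun]
  | cons x l ih =>
    cases x with
    | true => simp [pvTakeRun]
    | false => simpa [pvTakeRun, pvAf] using ih

theorem pvAf_takeTrue : ∀ (l : List Bool) (c : Int), 0 ≤ c →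
    max c (pvAf l 0 c) = max (c + (pvTakeRun true l).1) (pvAf (pvTakeRun true l).2 0 0) := by
  intro l
  induction l with
  | nil => intro c _; simp [pvTakeRun, pvAf]
  | cons x l ih =>
    intro c hc
    cases x with
    | false =>
      simp [pvTakeRun, pvAf]
    | true =>
      have hn := pvTakeRun_nonneg true l
      simp only [pvTakeRun, pvAf]
      norm_num
      rw [pvAf_max l (max 0 (c + 1)) (c + 1) (by omega) (by omega)]
      have h1 : max 0 (c + 1) = c + 1 := by omega
      rw [h1]
      have := ih (c + 1) (by omega)
      omega

theorem pvScan_max : ∀ (N : ℕ) (l : List Bool), l.length ≤ N → ∀ best : Int, 0 ≤ best →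
    pvScan l best = max best (pvScan l 0) := by
  intro N
  induction N with
  | zero =>
    intro l hl best hb
    have h : l = [] := List.eq_nil_of_length_eq_zero (Nat.le_zero.mp hl)
    subst h
    simp [pvScan]; omega
  | succ N ih =>
    intro l hl best hb
    cases l with
    | nil => simp [pvScan]; omega
    | cons b l =>
      have hlen : (pvTakeRun b l).2.length ≤ N := by
        have := pvTakeRun_len b l; simp at hl; omega
      have hn := pvTakeRun_nonneg b l
      cases b with
      | true =>
        simp only [pvScan]
        norm_num
        rw [ih _ hlen (max best ((pvTakeRun true l).1 + 1)) (by omega),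
            ih _ hlen (max 0 ((pvTakeRun true l).1 + 1)) (by omega)]
        omega
      | false =>
        simp only [pvScan]
        norm_num
        exact ih _ hlen best hb

theorem pvAf_eq_pvScan : ∀ (N : ℕ) (l : List Bool), l.length ≤ N → pvAf l 0 0 = pvScan l 0 := by
  intro N
  induction N with
  | zero =>
    intro l hl
    have h : l = [] := List.eq_nil_of_length_eq_zero (Nat.le_zero.mp hl)
    subst h
    simp [pvAf, pvScan]
  | succ N ih =>
    intro l hl
    cases l with
    | nil => simp [pvAf, pvScan]
    | cons b l =>
      have hlen : (pvTakeRun b l).2.length ≤ N := by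
        have := pvTakeRun_len b l; simp at hl; omega
      cases b with
      | false =>
        simp only [pvAf, pvScan]
        norm_num
        rw [pvAf_skipFalse l, ih _ hlen]
      | true =>
        have hn := pvTakeRun_nonneg true l
        simp only [pvAf, pvScan]
        norm_num
        rw [pvAf_max l 1 1 (by omega) (by omega)]
        have hT := pvAf_takeTrue l 1 (by omega)
        rw [ih _ hlen] at hT
        rw [pvScan_max N _ hlen (max 0 ((pvTakeRun true l).1 + 1)) (by omega)]
        omega

-- ===== VERDICT (by name: the statement is the Claim_ definition above) =====
theorem maxPeriodoCalor_spec : Claim_equal_maxPeriodoCalor := by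
  intro tab p _
  unfold Spec_maxPeriodoCalor maxPeriodoCalor maxPeriodoCalor_alt
  rw [foldl_eq_pvAf p tab 0 0]
  exact pvAf_eq_pvScan _ _ le_rfl
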